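-- pv_equiv track=rewrite | github.com/qslab-unipr/eqsp-srbb | qsp_srbb_circuit.py | zblock_param_order_indices
-- ===== SOURCE A (Python) =====
-- def gray_code_bits(n: int):
--     if n <= 0:
--         return [""]
--     codes = ["0", "1"]
--     for _ in range(2, n + 1):
--         codes = ["0" + c for c in codes] + ["1" + c for c in reversed(codes)]
--     return codes
--
-- def zblock_param_order_indices(N: int):
-- 	# base: N=2 -> [3,2,1] (θ15, θ8, θ3)
-- 	if N < 2:
-- 		return []
-- 	if N == 2:
-- 		return [3, 2, 1]
--
-- 	G = gray_code_bits(N)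
-- 	odd = [int(bits, 2) for bits in G if bits[-1] == "1"]  # LSB=1
--
-- 	# regola tua: "parto dalla seconda riga, ciclico"
-- 	if len(odd) > 1:
-- 		odd = odd[1:] + odd[:1]
--
-- 	prev = zblock_param_order_indices(N - 1)
-- 	prev_appended0 = [2 * i for i in prev]
--
-- 	order = odd + prev_appended0
-- 	i_star = 2**(N-1)  # bitstring 100..0
-- 	if i_star in order:
-- 		order.remove(i_star)
-- 		order.append(i_star)
--
-- 	return order
-- ===== SOURCE B (Python) =====
-- def zblock_param_order_indices(N: int):
--     # Iterative: concatenate, for n = N down to 3, the rotated odd Gray codes of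
--     # width n (computed directly as 2*(k^(k>>1))+1, no strings) scaled by 2**(N-n),
--     # then the doubled base block; the recursive "move 2**(n-1) to the end" of the
--     # original collapses into the fixed tail [3*2**(N-2), 2**(N-2), 2**(N-1)].
--     if N < 2:
--         return []
--     if N == 2:
--         return [3, 2, 1]
--     out = []
--     for n in range(N, 2, -1):
--         s = N - n
--         for k in range(1, 2 ** (n - 1)):
--             out.append((2 * (k ^ (k >> 1)) + 1) * 2 ** s)
--         out.append(2 ** s)
--     out.append(3 * 2 ** (N - 2))
--     out.append(2 ** (N - 2))
--     out.append(2 ** (N - 1))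
--     return out
-- ===== Notes on version B (the rewrite author's own statement) =====
-- stated objective: faster
-- what changed: Replaces A's recursion over N with per-level Gray-code tables rebuilt from strings and parsed by int(bits,2) by a single iterative loop that emits each level's odd Gray codes directly from the integer formula k ^ (k >> 1), folding the recursive move-2**(n-1)-to-the-end step into a fixed three-element tail.
import Mathlib
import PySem

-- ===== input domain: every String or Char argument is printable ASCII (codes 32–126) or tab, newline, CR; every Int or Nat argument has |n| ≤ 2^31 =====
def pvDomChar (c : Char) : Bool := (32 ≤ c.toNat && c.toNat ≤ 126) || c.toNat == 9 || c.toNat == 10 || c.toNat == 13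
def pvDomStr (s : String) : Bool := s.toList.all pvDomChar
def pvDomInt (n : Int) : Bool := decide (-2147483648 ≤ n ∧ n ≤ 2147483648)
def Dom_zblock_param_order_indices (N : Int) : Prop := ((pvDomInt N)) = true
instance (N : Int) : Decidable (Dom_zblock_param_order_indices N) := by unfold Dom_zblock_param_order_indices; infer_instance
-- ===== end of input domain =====

-- B replaces A's string-building Gray-code recursion by one iterative pass that emits the
-- odd Gray codes directly from the integer formula k ^ (k >> 1); same return value.

-- ===== PORT A =====
-- gray_code_bits: Python strings are ported as List Char (PySem's list side; "0"+c is '0' :: c, exact)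
def pvGrayCodeBits (n : Int) : List (List Char) :=
  if n ≤ 0 then [[]]
  else (PySem.List.pyRange 2 (n + 1) 1).foldl
      (fun codes _ => codes.map (fun c => '0' :: c) ++ codes.reverse.map (fun c => '1' :: c))
      [['0'], ['1']]

-- int(bits, 2), ported by hand: exact on the nonempty '0'/'1'-only strings gray_code_bits produces
def pvIntBase2 (cs : List Char) : Int :=
  cs.foldl (fun a c => 2 * a + (if c = '1' then 1 else 0)) 0

def zblock_param_order_indices (N : Int) : List Int :=
  if N < 2 then []
  else if N = 2 then [3, 2, 1]
  else
    let G := pvGrayCodeBits N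
    let odd0 := (G.filter (fun bits => PySem.List.pyGet? bits (-1) == some '1')).map pvIntBase2
    let odd := if 1 < odd0.length then
        PySem.List.slice odd0 (some 1) none ++ PySem.List.slice odd0 none (some 1)
      else odd0
    let prev := zblock_param_order_indices (N - 1)
    let prev0 := prev.map (fun i => 2 * i)
    let order := odd ++ prev0
    -- 2**(N-1): here N ≥ 3, so the exponent is the nonnegative integer N-1
    let istar : Int := 2 ^ (N - 1).toNat
    if istar ∈ order then ((PySem.List.remove? order istar).getD order) ++ [istar]
    else order
termination_by N.toNat
decreasing_by simp_all; omega

-- ===== PORT B =====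
def zblock_param_order_indices_alt (N : Int) : List Int :=
  if N < 2 then []
  else if N = 2 then [3, 2, 1]
  else
    -- for n in range(N, 2, -1): for k in range(1, 2**(n-1)): out.append(...); out.append(2**s)
    -- exponents n-1, s = N-n are nonnegative on this branch (N ≥ 3, 3 ≤ n ≤ N)
    let out := (PySem.List.pyRange N 2 (-1)).foldl (fun out n =>
      let s := N - n
      let out := (PySem.List.pyRange 1 (2 ^ (n - 1).toNat) 1).foldl
        (fun out k => out ++ [(2 * PySem.Int.bxor k (k >>> (1 : Nat)) + 1) * 2 ^ s.toNat]) out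
      out ++ [2 ^ s.toNat]) []
    out ++ [3 * 2 ^ (N - 2).toNat] ++ [2 ^ (N - 2).toNat] ++ [2 ^ (N - 1).toNat]

-- ===== PRECONDITION & SPEC =====
def Spec_zblock_param_order_indices (N : Int) (out : List Int) : Prop := out = zblock_param_order_indices_alt N
instance (N : Int) (out : List Int) : Decidable (Spec_zblock_param_order_indices N out) := by unfold Spec_zblock_param_order_indices; infer_instance

-- ===== CLAIM (what is proved, stated in full; the proofs are below) =====
def Claim_equal_zblock_param_order_indices : Prop := ∀ (N : Int), Dom_zblock_param_order_indices N → Spec_zblock_param_order_indices N (zblock_param_order_indices N)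

-- ===== LEMMAS AND PROOFS =====

-- the integer Gray code k ^ (k >> 1), at the Nat level
def pvG (k : Nat) : Nat := k ^^^ (k >>> 1)

-- the reflected Gray sequence of width n, as values
def pvGrayN (n : Nat) : List Nat := (List.range (2 ^ n)).map pvG

-- the string Gray table after k doubling iterations (width k+1); mirrors gray_code_bits' loop
def pvStrG : Nat → List (List Char)
  | 0 => [['0'], ['1']]
  | k + 1 => (pvStrG k).map (fun c => '0' :: c) ++ (pvStrG k).reverse.map (fun c => '1' :: c)

def pvValN (cs : List Char) : Nat := cs.foldl (fun a c => 2 * a + (if c = '1' then 1 else 0)) 0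

def pvHOdd (k : Nat) : Int := ((2 * pvG k + 1 : Nat) : Int)

-- the rotated odd-Gray block of width n
def pvRotOdd (n : Nat) : List Int := (List.range' 1 (2 ^ (n - 1) - 1)).map pvHOdd ++ [1]

-- the common recursive shape both programs compute for m ≥ 3 (base [3,1,2] = level-2 tail with 2 last)
def pvBclean : Nat → List Int
  | 0 => [3, 1, 2]
  | 1 => [3, 1, 2]
  | 2 => [3, 1, 2]
  | m + 3 => pvRotOdd (m + 3) ++ (pvBclean (m + 2)).map (fun x => 2 * x)

theorem pv_mask_sub : ∀ (n t : Nat), t < 2^n → 2^n - 1 - t = (2^n - 1) ^^^ t := by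
  intro n
  induction n with
  | zero => intro t h; interval_cases t <;> decide
  | succ n ih =>
    intro t h
    have h2 : t / 2 < 2^n := by omega
    have ht := ih (t/2) h2
    have hb : t % 2 = 0 ∨ t % 2 = 1 := by omega
    have e1 : (2:Nat)^(n+1) - 1 = Nat.bit true (2^n - 1) := by
      simp [Nat.bit]; have := Nat.one_le_two_pow (n := n); omega
    rcases hb with hb | hb
    · have e2 : t = Nat.bit false (t/2) := by simp [Nat.bit]; omega
      rw [e1]; conv => rw [e2]
      rw [Nat.xor_bit]; simp [Nat.bit] at *; omega
    · have e2 : t = Nat.bit true (t/2) := by simp [Nat.bit]; omega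
      rw [e1]; conv => rw [e2]
      rw [Nat.xor_bit]; simp [Nat.bit] at *; omega

theorem pv_pow_add_eq_xor (n x : Nat) (h : x < 2^n) : 2^n + x = 2^n ^^^ x := by
  apply Nat.eq_of_testBit_eq
  intro i
  rcases Nat.lt_trichotomy i n with hi | hi | hi
  · rw [Nat.testBit_two_pow_add_gt hi, Nat.testBit_xor,
      Nat.testBit_two_pow_of_ne (by omega), Bool.false_xor]
  · subst hi
    rw [Nat.testBit_two_pow_add_eq, Nat.testBit_xor, Nat.testBit_two_pow_self,
      Nat.testBit_eq_false_of_lt h]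
    rfl
  · have h1 : (2^n + x).testBit i = false := by
      apply Nat.testBit_eq_false_of_lt
      calc 2^n + x < 2^n + 2^n := by omega
        _ = 2^(n+1) := by ring
        _ ≤ 2^i := Nat.pow_le_pow_right (by norm_num) hi
    rw [h1, Nat.testBit_xor, Nat.testBit_two_pow_of_ne (by omega),
      Nat.testBit_eq_false_of_lt (lt_of_lt_of_le h (Nat.pow_le_pow_right (by norm_num) (by omega)))]
    rfl

theorem pv_gray_reflect (n t : Nat) (ht : t < 2^n) :
    pvG (2^n + t) = 2^n + pvG (2^n - 1 - t) := by
  unfold pvG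
  have hs : 2^n - 1 - t < 2^n := by have := Nat.one_le_two_pow (n := n); omega
  have hshift : ∀ y : Nat, y < 2^n → y >>> 1 < 2^n := by
    intro y hy; rw [Nat.shiftRight_eq_div_pow]; omega
  rw [pv_pow_add_eq_xor n t ht,
    pv_pow_add_eq_xor n _ (Nat.xor_lt_two_pow hs (hshift _ hs)),
    pv_mask_sub n t ht]
  apply Nat.eq_of_testBit_eq
  intro i
  have htop : ∀ j, n ≤ j → t.testBit j = false := fun j hj =>
    Nat.testBit_eq_false_of_lt (lt_of_lt_of_le ht (Nat.pow_le_pow_right (by norm_num) hj))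
  simp only [Nat.testBit_xor, Nat.testBit_shiftRight, Nat.testBit_two_pow,
    Nat.testBit_two_pow_sub_one]
  rcases Nat.lt_trichotomy (i+1) n with hi | hi | hi
  · have e1 : i ≠ n := by omega
    have e2 : 1+i ≠ n := by omega
    simp [e1, e2, show n ≠ i by omega, show n ≠ 1+i by omega, show i < n by omega, show 1+i < n by omega, Bool.xor_assoc]
  · have e1 : i ≠ n := by omega
    have e2 : n = 1+i := by omega
    have e3 : t.testBit (1+i) = false := htop _ (by omega)
    simp [e1, e2, e3, show i < n by omega, Bool.xor_assoc]
  · rcases Nat.lt_trichotomy i n with hj | hj | hj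
    · omega
    · have e3 : t.testBit (1+i) = false := htop _ (by omega)
      have e4 : t.testBit i = false := htop _ (by omega)
      simp [hj, e3, e4, show ¬ (1+i = n) by omega, show (n:Nat) ≠ 1+n by omega, show ¬ (1+i < n) by omega]
    · have e3 : t.testBit (1+i) = false := htop _ (by omega)
      have e4 : t.testBit i = false := htop _ (by omega)
      simp [e3, e4, show n ≠ i by omega, show n ≠ 1+i by omega,
        show ¬ (i < n) by omega, show ¬ (1+i < n) by omega]

theorem pv_grayN_succ (n : Nat) :
    pvGrayN (n + 1) = pvGrayN n ++ (pvGrayN n).reverse.map (fun x => 2 ^ n + x) := by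
  unfold pvGrayN
  have h2 : 2 ^ (n + 1) = 2 ^ n + 2 ^ n := by ring
  rw [h2, List.range_add, List.map_append]
  congr 1
  rw [← List.map_reverse, List.range_eq_range', List.reverse_range', List.map_map, List.map_map,
    ← List.range_eq_range', List.map_map]
  apply List.map_congr_left
  intro i hi
  have hlt : i < 2 ^ n := List.mem_range.mp hi
  simp only [Function.comp_apply]
  rw [pv_gray_reflect n i hlt]
  congr 2
  omega

theorem pv_strG_length : ∀ k, ∀ c ∈ pvStrG k, c.length = k + 1 := by
  intro k
  induction k with
  | zero => intro c hc; simp [pvStrG] at hc; rcases hc with rfl | rfl <;> rfl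
  | succ k ih =>
    intro c hc
    simp only [pvStrG, List.mem_append, List.mem_map, List.mem_reverse] at hc
    rcases hc with ⟨d, hd, rfl⟩ | ⟨d, hd, rfl⟩ <;> simp [ih d hd]

theorem pv_valN_aux : ∀ (cs : List Char) (a : Nat),
    cs.foldl (fun a c => 2 * a + (if c = '1' then 1 else 0)) a = a * 2 ^ cs.length + pvValN cs := by
  intro cs
  induction cs with
  | nil => intro a; simp [pvValN]
  | cons c cs ih =>
    intro a
    simp only [List.foldl_cons, List.length_cons, pvValN]
    rw [ih, ih (2 * 0 + _)]
    by_cases hc : c = '1' <;> simp [hc] <;> ring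

theorem pv_valN_cons0 (cs : List Char) : pvValN ('0' :: cs) = pvValN cs := by
  simp [pvValN, List.foldl_cons]
theorem pv_valN_cons1 (cs : List Char) : pvValN ('1' :: cs) = 2 ^ cs.length + pvValN cs := by
  simp only [pvValN, List.foldl_cons]
  rw [pv_valN_aux]
  norm_num [pvValN, Nat.add_comm]

theorem pv_oddVal : ∀ k,
    ((pvStrG k).filter (fun cs => PySem.List.pyGet? cs (-1) == some '1')).map pvValN
      = (pvGrayN k).map (fun x => 2 * x + 1) := by
  intro k
  induction k with
  | zero => decide
  | succ k ih =>
    have hne : ∀ c ∈ pvStrG k, c ≠ [] := by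
      intro c hc h
      have := pv_strG_length k c hc
      simp [h] at this
    have hcond : ∀ (x : Char), ∀ c ∈ pvStrG k,
        (PySem.List.pyGet? (x :: c) (-1) == some '1') = (PySem.List.pyGet? c (-1) == some '1') := by
      intro x c hc
      rw [PySem.List.pyGet?_neg_one, PySem.List.pyGet?_neg_one]
      congr 1
      have hn := hne c hc
      cases c with
      | nil => exact absurd rfl hn
      | cons y ys => rw [List.getLast?_cons_cons]
    simp only [pvStrG, List.filter_append, List.filter_map, List.map_append, List.map_map,
      Function.comp_def]
    rw [List.filter_congr (q := fun cs => PySem.List.pyGet? cs (-1) == some '1')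
        (fun c hc => hcond '0' c hc),
      List.filter_congr (l := (pvStrG k).reverse)
        (q := fun cs => PySem.List.pyGet? cs (-1) == some '1')
        (fun c hc => hcond '1' c (List.mem_reverse.mp hc)),
      List.filter_reverse]
    have e0 : List.map (fun x => pvValN ('0' :: x))
        (List.filter (fun cs => PySem.List.pyGet? cs (-1) == some '1') (pvStrG k))
        = List.map (fun x => 2 * x + 1) (pvGrayN k) := by
      rw [← ih]
      exact List.map_congr_left (fun c _ => pv_valN_cons0 c)
    have e1 : List.map (fun x => pvValN ('1' :: x))
        ((List.filter (fun cs => PySem.List.pyGet? cs (-1) == some '1') (pvStrG k)).reverse)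
        = List.map (fun x => 2 ^ (k + 1) + x)
            ((List.map (fun x => 2 * x + 1) (pvGrayN k)).reverse) := by
      rw [← ih, ← List.map_reverse, List.map_map]
      apply List.map_congr_left
      intro c hc
      have hmem : c ∈ pvStrG k := List.mem_of_mem_filter (List.mem_reverse.mp hc)
      simp only [Function.comp_apply]
      rw [pv_valN_cons1, pv_strG_length k c hmem]
    rw [e0, e1, pv_grayN_succ, List.map_append]
    congr 1
    rw [← List.map_reverse, List.map_map, List.map_map]
    apply List.map_congr_left
    intro x _
    simp only [Function.comp_apply]
    ring

theorem pv_gray_fold (j : Nat) :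
    (PySem.List.pyRange 2 (2 + (j : Int)) 1).foldl
      (fun codes _ => codes.map (fun c => '0' :: c) ++ codes.reverse.map (fun c => '1' :: c))
      [['0'], ['1']] = pvStrG j := by
  induction j with
  | zero => rw [show (2 + ((0:Nat):Int)) = 2 by norm_num, PySem.List.pyRange_one_eq_nil (by omega)]; rfl
  | succ j ih =>
    rw [show (2 + ((j+1:Nat):Int)) = (2 + (j:Int)) + 1 by push_cast; ring,
      PySem.List.pyRange_one_succ_right (by omega), List.foldl_append, ih]
    rfl

theorem pv_grayCodeBits_eq (m : Nat) (h : 1 ≤ m) : pvGrayCodeBits (m : Int) = pvStrG (m - 1) := by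
  unfold pvGrayCodeBits
  rw [if_neg (by omega)]
  rw [show ((m : Int) + 1) = 2 + ((m - 1 : Nat) : Int) by omega]
  exact pv_gray_fold (m - 1)

theorem pv_intBase2_aux : ∀ (cs : List Char) (a : Nat),
    cs.foldl (fun a c => 2 * a + (if c = '1' then 1 else 0)) (a : Int)
      = ((cs.foldl (fun a c => 2 * a + (if c = '1' then 1 else 0)) a : Nat) : Int) := by
  intro cs
  induction cs with
  | nil => intro a; rfl
  | cons c cs ih =>
    intro a
    simp only [List.foldl_cons]
    by_cases hc : c = '1'
    · simp only [hc, if_true]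
      rw [show ((2 * (a:Int) + 1)) = ((2 * a + 1 : Nat) : Int) by push_cast; ring]
      exact ih (2 * a + 1)
    · simp only [hc, if_false]
      rw [show ((2 * (a:Int) + 0)) = ((2 * a + 0 : Nat) : Int) by push_cast; ring]
      exact ih (2 * a + 0)

theorem pv_intBase2_cast (cs : List Char) : pvIntBase2 cs = ((pvValN cs : Nat) : Int) := by
  unfold pvIntBase2 pvValN
  exact_mod_cast pv_intBase2_aux cs 0

theorem pv_oddA (m : Nat) (h : 3 ≤ m) :
    ((pvGrayCodeBits (m : Int)).filter (fun bits => PySem.List.pyGet? bits (-1) == some '1')).map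
        pvIntBase2
      = (List.range (2 ^ (m - 1))).map pvHOdd := by
  rw [pv_grayCodeBits_eq m (by omega)]
  have e : ((pvStrG (m-1)).filter (fun cs => PySem.List.pyGet? cs (-1) == some '1')).map pvIntBase2
      = ((pvStrG (m-1)).filter (fun cs => PySem.List.pyGet? cs (-1) == some '1')).map
          (fun cs => ((pvValN cs : Nat) : Int)) :=
    List.map_congr_left (fun c _ => pv_intBase2_cast c)
  rw [e, show (fun cs => ((pvValN cs : Nat) : Int)) = (fun n => ((n : Nat) : Int)) ∘ pvValN from rfl,
    ← List.map_map, pv_oddVal (m-1), pvGrayN, List.map_map, List.map_map]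
  rfl

theorem pv_range_cons (M : Nat) (h : 1 ≤ M) :
    List.range M = 0 :: List.range' 1 (M - 1) := by
  rw [List.range_eq_range', show M = (M - 1) + 1 by omega, List.range'_succ]
  norm_num

theorem pv_rotate (m : Nat) :
    PySem.List.slice ((List.range (2 ^ m)).map pvHOdd) (some 1) none
        ++ PySem.List.slice ((List.range (2 ^ m)).map pvHOdd) none (some 1)
      = pvRotOdd (m + 1) := by
  rw [PySem.List.slice_from_one, PySem.List.slice_to _ (by norm_num),
    pv_range_cons (2 ^ m) (Nat.one_le_two_pow)]
  simp only [List.map_cons, List.tail_cons, Int.toNat_one, List.take_succ_cons, List.take_zero]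
  rfl

theorem pv_Bclean_succ (m : Nat) (h : 2 ≤ m) :
    pvBclean (m + 1) = pvRotOdd (m + 1) ++ (pvBclean m).map (fun x => 2 * x) := by
  obtain ⟨k, rfl⟩ : ∃ k, m = k + 2 := ⟨m - 2, by omega⟩
  rfl

theorem pv_rotOdd_odd (n : Nat) : ∀ x ∈ pvRotOdd n, x % 2 = 1 := by
  intro x hx
  unfold pvRotOdd at hx
  rcases List.mem_append.mp hx with hx | hx
  · obtain ⟨k, _, rfl⟩ := List.mem_map.mp hx
    unfold pvHOdd
    omega
  · simp at hx; omega

theorem pv_Bclean_last : ∀ m, 2 ≤ m →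
    ∃ L, pvBclean m = L ++ [((2:Int) ^ (m - 1))] ∧ ((2:Int) ^ (m - 1)) ∉ L := by
  intro m
  induction m with
  | zero => omega
  | succ m ih =>
    intro h
    by_cases hm : m < 2
    · interval_cases m
      · omega
      · exact ⟨[3, 1], by decide⟩
    · obtain ⟨L, hL, hnot⟩ := ih (by omega)
      refine ⟨pvRotOdd (m + 1) ++ L.map (fun x => 2 * x), ?_, ?_⟩
      · rw [pv_Bclean_succ m (by omega), hL, List.map_append, ← List.append_assoc]
        congr 1
        simp only [List.map_cons, List.map_nil]
        rw [show (2:Int) * 2 ^ (m - 1) = 2 ^ (m + 1 - 1) by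
          rw [show m + 1 - 1 = (m - 1) + 1 by omega]; ring]
      · intro hmem
        rcases List.mem_append.mp hmem with hmem | hmem
        · have := pv_rotOdd_odd (m + 1) _ hmem
          have h2 : ((2:Int) ^ (m + 1 - 1)) % 2 = 0 := by
            rw [show m + 1 - 1 = (m - 1) + 1 by omega, pow_succ]
            omega
          omega
        · obtain ⟨y, hy, hey⟩ := List.mem_map.mp hmem
          apply hnot
          have : y = 2 ^ (m - 1) := by
            have : (2:Int) * y = 2 ^ (m + 1 - 1) := hey
            rw [show m + 1 - 1 = (m - 1) + 1 by omega, pow_succ] at this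
            omega
          rwa [this] at hy

theorem pv_remove_last {x : Int} : ∀ (L : List Int), x ∉ L →
    PySem.List.remove? (L ++ [x]) x = some L := by
  intro L
  induction L with
  | nil => intro _; simp [PySem.List.remove?_cons_self]
  | cons y ys ih =>
    intro h
    have hy : y ≠ x := by simp at h; tauto
    rw [List.cons_append, PySem.List.remove?_cons_of_ne _ hy, ih (by simp at h; tauto)]
    rfl

theorem pv_A_eq_Bclean : ∀ (m : Nat), 3 ≤ m → zblock_param_order_indices (m : Int) = pvBclean m := by
  intro m h
  induction m, h using Nat.le_induction with
  | base =>
    have h2 : zblock_param_order_indices 2 = [3, 2, 1] := by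
      unfold zblock_param_order_indices; norm_num
    rw [show ((3:Nat):Int) = 3 by norm_num]
    unfold zblock_param_order_indices
    norm_num [h2]
    decide
  | succ n hn ih =>
    rw [zblock_param_order_indices]
    rw [if_neg (by push_cast; omega), if_neg (by push_cast; omega)]
    simp only []
    rw [pv_oddA (n + 1) (by omega)]
    simp only [Nat.add_sub_cancel]
    have hlen : 1 < (List.map pvHOdd (List.range (2 ^ n))).length := by
      simp only [List.length_map, List.length_range]
      calc 1 < 2 ^ 1 := by norm_num
        _ ≤ 2 ^ n := Nat.pow_le_pow_right (by norm_num) (by omega)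
    rw [if_pos hlen, pv_rotate n,
      show ((n + 1 : Nat) : Int) - 1 = ((n : Nat) : Int) by push_cast; ring,
      ih, Int.toNat_natCast, ← pv_Bclean_succ n (by omega)]
    obtain ⟨L, hL, hnot⟩ := pv_Bclean_last (n + 1) (by omega)
    rw [Nat.add_sub_cancel] at hL hnot
    rw [hL, if_pos (List.mem_append_right L (List.mem_singleton_self _)),
      pv_remove_last L hnot]
    rfl

-- the per-level block B emits, as a function of N and the level n
def pvBlkI (N n : Int) : List Int :=
  (PySem.List.pyRange 1 (2 ^ (n - 1).toNat) 1).map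
    (fun k => (2 * PySem.Int.bxor k (k >>> (1 : Nat)) + 1) * 2 ^ (N - n).toNat)
    ++ [2 ^ (N - n).toNat]

theorem pv_B_flat (N : Int) (h : ¬ N < 2) (h2 : ¬ N = 2) :
    zblock_param_order_indices_alt N =
      (PySem.List.pyRange N 2 (-1)).flatMap (pvBlkI N)
        ++ [3 * 2 ^ (N - 2).toNat] ++ [2 ^ (N - 2).toNat] ++ [2 ^ (N - 1).toNat] := by
  unfold zblock_param_order_indices_alt
  rw [if_neg h, if_neg h2]
  simp only [PySem.List.foldl_append_singleton_eq_map, List.append_assoc]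
  rw [PySem.List.foldl_append_eq_flatMap]
  have : (PySem.List.pyRange N 2 (-1)).flatMap (fun n =>
        (PySem.List.pyRange 1 (2 ^ (n - 1).toNat) 1).map
          (fun x => (2 * PySem.Int.bxor x (x >>> (1:Nat)) + 1) * 2 ^ (N - n).toNat) ++
          [2 ^ (N - n).toNat])
      = (PySem.List.pyRange N 2 (-1)).flatMap (pvBlkI N) := by
    apply List.flatMap_congr
    intro x _
    rfl
  rw [this]
  simp [List.append_assoc]

theorem pv_blk_top (m : Nat) (h : 3 ≤ m) : pvBlkI (m : Int) (m : Int) = pvRotOdd m := by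
  unfold pvBlkI pvRotOdd
  rw [sub_self, Int.toNat_zero, pow_zero,
    show ((m:Int) - 1).toNat = m - 1 by omega,
    show ((2:Int) ^ (m-1)) = ((2 ^ (m-1) : Nat) : Int) by push_cast; ring,
    PySem.List.pyRange_one, List.map_map,
    show ((2 ^ (m-1) : Nat) : Int) - 1 = ((2 ^ (m-1) - 1 : Nat) : Int) by
      have h1 : 1 ≤ 2 ^ (m-1) := Nat.one_le_two_pow
      omega,
    Int.toNat_natCast, List.range'_eq_map_range]
  congr 1
  rw [List.map_map]
  apply List.map_congr_left
  intro j _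
  simp only [Function.comp_apply]
  rw [show (1 : Int) + (j : Nat) = ((1 + j : Nat) : Int) by push_cast; ring,
    show ((1 + j : Nat) : Int) >>> (1:Nat) = (((1 + j) >>> 1 : Nat) : Int) from rfl,
    PySem.Int.bxor_natCast]
  unfold pvHOdd pvG
  push_cast
  ring

theorem pv_blk_scale (m : Nat) (x : Int) (hx2 : x ≤ (m : Int)) :
    pvBlkI ((m : Int) + 1) x = (pvBlkI (m : Int) x).map (fun v => 2 * v) := by
  unfold pvBlkI
  rw [List.map_append, List.map_map,
    show ((m : Int) + 1 - x).toNat = ((m : Int) - x).toNat + 1 by omega, pow_succ]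
  congr 1
  · apply List.map_congr_left
    intro k _
    simp only [Function.comp_apply]
    ring
  · simp only [List.map_cons, List.map_nil]
    congr 1
    ring

theorem pv_flat_tail : ∀ (m : Nat), 3 ≤ m →
    (PySem.List.pyRange (m : Int) 2 (-1)).flatMap (pvBlkI (m : Int))
        ++ [3 * 2 ^ ((m : Int) - 2).toNat] ++ [2 ^ ((m : Int) - 2).toNat]
        ++ [2 ^ ((m : Int) - 1).toNat]
      = pvBclean m := by
  intro m h
  induction m, h using Nat.le_induction with
  | base => decide
  | succ n hn ih =>
    have hcast : ((n + 1 : Nat) : Int) = (n : Int) + 1 := by push_cast; ring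
    rw [hcast, PySem.List.pyRange_neg_one_cons (by omega), List.flatMap_cons,
      show ((n : Int) + 1 - 1) = (n : Int) by ring,
      show ((n : Int) + 1 - 2) = (n : Int) - 1 by ring,
      ← hcast, pv_blk_top (n + 1) (by omega)]
    have hblocks : (PySem.List.pyRange (n : Int) 2 (-1)).flatMap (pvBlkI ((n + 1 : Nat) : Int))
        = ((PySem.List.pyRange (n : Int) 2 (-1)).flatMap (pvBlkI (n : Int))).map
            (fun v => 2 * v) := by
      rw [List.map_flatMap]
      apply List.flatMap_congr
      intro x hx
      have := (PySem.List.mem_pyRange_neg_one).mp hx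
      rw [hcast]
      exact pv_blk_scale n x (by omega)
    rw [hblocks]
    have e1 : ((n : Int) - 1).toNat = ((n : Int) - 2).toNat + 1 := by omega
    have e2 : ((n : Int) + 1 - 1).toNat = ((n : Int) - 1).toNat + 1 := by omega
    rw [show (3 : Int) * 2 ^ ((n:Int) - 1).toNat = 2 * (3 * 2 ^ ((n:Int) - 2).toNat) by
        rw [e1]; ring,
      show (2 : Int) ^ ((n:Int) - 1).toNat = 2 * 2 ^ ((n:Int) - 2).toNat by rw [e1]; ring,
      show (2 : Int) ^ ((n:Int)).toNat = 2 * 2 ^ ((n:Int) - 1).toNat by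
        rw [show ((n:Int)).toNat = ((n:Int) - 1).toNat + 1 by omega]; ring]
    rw [pv_Bclean_succ n (by omega), ← ih]
    simp [List.append_assoc]

theorem pv_B_eq_Bclean (m : Nat) (h : 3 ≤ m) :
    zblock_param_order_indices_alt (m : Int) = pvBclean m := by
  rw [pv_B_flat (m : Int) (by omega) (by omega)]
  exact pv_flat_tail m h

-- ===== VERDICT (by name: the statement is the Claim_ definition above) =====
theorem zblock_param_order_indices_spec : Claim_equal_zblock_param_order_indices := by
  intro N _
  unfold Spec_zblock_param_order_indices
  by_cases h1 : N < 2
  · unfold zblock_param_order_indices zblock_param_order_indices_alt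
    simp [h1]
  · by_cases h2 : N = 2
    · subst h2
      unfold zblock_param_order_indices zblock_param_order_indices_alt
      norm_num
    · have h3 : 3 ≤ N := by omega
      have hN : N = (N.toNat : Int) := by omega
      have hm : 3 ≤ N.toNat := by omega
      rw [hN, pv_A_eq_Bclean N.toNat hm, pv_B_eq_Bclean N.toNat hm]
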